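-- pv_equiv track=rewrite | github.com/Anshaff-Am/AMF1_data_verification | scripts/build_reference_doc.py | is_in_scope
-- ===== SOURCE A (Python) =====
-- IN_SCOPE_PREFIXES = {
--     # Overview P0
--     "D1", "D2", "D3", "D4", "D5", "D6",
--     # Routing / partner questions used in dashboard
--     "D7", "D8", "D9",
--     "D14", "D15", "D16",
--     # Partner-specific
--     "B1", "B2", "B2A", "B3", "B5", "B7",
--     "C5", "C6",
--     "ARC1", "ARC2", "ARC5", "ARC6", "ARC7", "ARC8",
--     "CON1", "CON2", "CON3", "CON4", "CON5", "CON6", "CON7", "CON8",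
--     "COR1",
--     "MAA1", "MAA2", "MAA3", "MAA4", "MAA5", "MAA6", "MAA7", "MAA8",
--     "VAL1",
--     "PEP1", "PEP2",
--     "NEX1",
--     "GLN1",
--     "SER1",
--     "ATL1", "ATL2",
--     "COG1", "COG2", "COG3",
--     "TTK1", "TTK2", "TTK3", "TTK4", "TTK5", "TTK6", "TTK7",
-- }
--
-- OUT_OF_SCOPE_PREFIXES = {"D10", "D11", "D12", "D13"}
--
-- def is_in_scope(qcode: str) -> bool:
--     if not qcode:
--         return False
--     uc = qcode.upper()
--     if uc in OUT_OF_SCOPE_PREFIXES: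
--         return False
--     # Exact match first
--     if uc in IN_SCOPE_PREFIXES:
--         return True
--     # Prefix match: e.g. "D14" matches "D14" prefix
--     for pfx in IN_SCOPE_PREFIXES:
--         if uc.startswith(pfx):
--             return True
--     return False
-- ===== SOURCE B (Python) =====
-- _IN_SCOPE = frozenset(
--     "D1 D2 D3 D4 D5 D6 D7 D8 D9 D14 D15 D16 "
--     "B1 B2 B2A B3 B5 B7 C5 C6 "
--     "ARC1 ARC2 ARC5 ARC6 ARC7 ARC8 "
--     "CON1 CON2 CON3 CON4 CON5 CON6 CON7 CON8 COR1 "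
--     "MAA1 MAA2 MAA3 MAA4 MAA5 MAA6 MAA7 MAA8 "
--     "VAL1 PEP1 PEP2 NEX1 GLN1 SER1 ATL1 ATL2 "
--     "COG1 COG2 COG3 TTK1 TTK2 TTK3 TTK4 TTK5 TTK6 TTK7".split()
-- )
-- _OUT_OF_SCOPE = frozenset("D10 D11 D12 D13".split())
-- _MAX_LEN = max(map(len, _IN_SCOPE))
--
--
-- def is_in_scope(qcode: str) -> bool:
--     if not qcode:
--         return False
--     uc = qcode.upper()
--     if uc in _OUT_OF_SCOPE:
--         return False
--     # A query is in scope iff one of its own prefixes is a known in-scope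
--     # prefix (this subsumes the exact-match check): grow a prefix accumulator
--     # one character at a time and look it up in the set.
--     acc = ""
--     for ch in uc:
--         acc = acc + ch
--         if acc in _IN_SCOPE:
--             return True
--         if len(acc) == _MAX_LEN:
--             break
--     return False
-- ===== Notes on version B (the rewrite author's own statement) =====
-- stated objective: alternative
-- what changed: B walks the query string with an accumulator, growing a prefix one character at a time (up to the set's max prefix length) and looking it up in the set (subsuming A's exact-match branch), instead of scanning the whole prefix set with startswith.
import Mathlib
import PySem

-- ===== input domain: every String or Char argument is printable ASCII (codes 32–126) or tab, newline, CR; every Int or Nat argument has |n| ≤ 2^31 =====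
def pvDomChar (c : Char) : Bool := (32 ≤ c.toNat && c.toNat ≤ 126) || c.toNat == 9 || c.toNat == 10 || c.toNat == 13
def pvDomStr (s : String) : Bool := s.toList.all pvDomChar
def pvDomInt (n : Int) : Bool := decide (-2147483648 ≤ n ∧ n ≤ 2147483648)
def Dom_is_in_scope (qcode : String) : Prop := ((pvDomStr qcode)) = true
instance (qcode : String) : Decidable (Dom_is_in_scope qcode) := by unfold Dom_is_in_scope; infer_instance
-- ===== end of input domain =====

-- B replaces A's startswith scan over the prefix set with a recursive walk of the query
-- that grows a prefix accumulator character by character and looks it up (alternative; same results).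

-- ===== PORT A =====
-- A's module-level set literals
def inScopePrefixes : PySem.Set String := PySem.Set.ofList
  ["D1", "D2", "D3", "D4", "D5", "D6",
   "D7", "D8", "D9",
   "D14", "D15", "D16",
   "B1", "B2", "B2A", "B3", "B5", "B7",
   "C5", "C6",
   "ARC1", "ARC2", "ARC5", "ARC6", "ARC7", "ARC8",
   "CON1", "CON2", "CON3", "CON4", "CON5", "CON6", "CON7", "CON8",
   "COR1",
   "MAA1", "MAA2", "MAA3", "MAA4", "MAA5", "MAA6", "MAA7", "MAA8",
   "VAL1",
   "PEP1", "PEP2",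
   "NEX1",
   "GLN1",
   "SER1",
   "ATL1", "ATL2",
   "COG1", "COG2", "COG3",
   "TTK1", "TTK2", "TTK3", "TTK4", "TTK5", "TTK6", "TTK7"]

def outOfScopePrefixes : PySem.Set String := PySem.Set.ofList ["D10", "D11", "D12", "D13"]

def is_in_scope (qcode : String) : Bool :=
  if qcode == "" then false
  else
    let uc := PySem.Str.upper qcode
    if outOfScopePrefixes.contains uc then false
    else if inScopePrefixes.contains uc then true
    else inScopePrefixes.any (fun pfx => PySem.Str.startswith uc pfx)

-- ===== PORT B =====
-- B builds its sets by splitting one whitespace-separated literal (frozenset("…".split()))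
def bInScope : PySem.Set String := PySem.Set.ofList (PySem.Str.split₀
  ("D1 D2 D3 D4 D5 D6 D7 D8 D9 D14 D15 D16 " ++
   "B1 B2 B2A B3 B5 B7 C5 C6 " ++
   "ARC1 ARC2 ARC5 ARC6 ARC7 ARC8 " ++
   "CON1 CON2 CON3 CON4 CON5 CON6 CON7 CON8 COR1 " ++
   "MAA1 MAA2 MAA3 MAA4 MAA5 MAA6 MAA7 MAA8 " ++
   "VAL1 PEP1 PEP2 NEX1 GLN1 SER1 ATL1 ATL2 " ++
   "COG1 COG2 COG3 TTK1 TTK2 TTK3 TTK4 TTK5 TTK6 TTK7"))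

def bOutOfScope : PySem.Set String := PySem.Set.ofList (PySem.Str.split₀ "D10 D11 D12 D13")

-- _MAX_LEN = max(map(len, _IN_SCOPE)); the set is nonempty so the getD default is never used
def bMaxLen : Int := (PySem.List.max? (bInScope.map PySem.Str.len) (fun x => x)).getD 0

-- the for-loop over uc with early return: consume the remaining characters one at a time, looking the grown prefix accumulator up
def anyPrefix : List Char → List Char → Bool
  | [], _ => false
  | c :: rs, acc =>
    let acc' := acc ++ [c]
    if bInScope.contains (String.ofList acc') then true
    else if (acc'.length : Int) == bMaxLen then false
    else anyPrefix rs acc'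

def is_in_scope_alt (qcode : String) : Bool :=
  if qcode == "" then false
  else
    let uc := PySem.Str.upper qcode
    if bOutOfScope.contains uc then false
    else anyPrefix uc.toList []

-- ===== PRECONDITION & SPEC =====
def Spec_is_in_scope (qcode : String) (out : Bool) : Prop := out = is_in_scope_alt qcode
instance (qcode : String) (out : Bool) : Decidable (Spec_is_in_scope qcode out) := by unfold Spec_is_in_scope; infer_instance

-- ===== CLAIM (what is proved, stated in full; the proofs are below) =====
def Claim_equal_is_in_scope : Prop := ∀ (qcode : String), Dom_is_in_scope qcode → Spec_is_in_scope qcode (is_in_scope qcode)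

-- ===== LEMMAS AND PROOFS =====

set_option maxRecDepth 8000 in
-- B's split-built sets coincide with A's literal sets
theorem bInScope_eq : bInScope = inScopePrefixes := by decide

set_option maxRecDepth 4000 in
theorem bOutOfScope_eq : bOutOfScope = outOfScopePrefixes := by decide

set_option maxRecDepth 4000 in
-- every element of the in-scope set is a nonempty string
theorem inScope_nonempty : ∀ p ∈ inScopePrefixes, 1 ≤ p.toList.length := by decide

set_option maxRecDepth 4000 in
-- every element of the in-scope set has length at most 4
theorem inScope_len_le : ∀ p ∈ inScopePrefixes, p.toList.length ≤ 4 := by decide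

set_option maxRecDepth 8000 in
theorem bMaxLen_eq : bMaxLen = 4 := by decide

-- characterisation of B's walk (with the length cap)
theorem anyPrefix_iff (rest acc : List Char) (hacc : acc.length ≤ 3) :
    anyPrefix rest acc = true ↔
    ∃ k, 1 ≤ k ∧ k ≤ rest.length ∧ acc.length + k ≤ 4 ∧
      String.ofList (acc ++ rest.take k) ∈ inScopePrefixes := by
  induction rest generalizing acc with
  | nil =>
    simp only [anyPrefix, List.length_nil, Bool.false_eq_true, false_iff]
    rintro ⟨k, hk, hk0, -, -⟩
    omega
  | cons c rs ih =>
    simp only [anyPrefix, bMaxLen_eq]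
    by_cases h : bInScope.contains (String.ofList (acc ++ [c])) = true
    · rw [if_pos h]
      simp only [true_iff]
      refine ⟨1, le_refl _, by simp, by omega, ?_⟩
      rw [bInScope_eq] at h
      simpa using h
    · rw [if_neg h]
      by_cases h4 : ((acc.length + 1 : Nat) : Int) == (4 : Int)
      · have h4' : acc.length = 3 := by
          have := of_decide_eq_true h4
          omega
        rw [if_pos (by simp [h4'] )]
        simp only [Bool.false_eq_true, false_iff]
        rintro ⟨k, hk1, hk2, hk3, hmem⟩
        have hk : k = 1 := by omega
        subst hk
        apply h
        rw [bInScope_eq]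
        simpa using hmem
      · rw [if_neg (by simpa using h4)]
        have hlt : acc.length + 1 ≤ 3 := by
          have : ¬ ((acc.length + 1 : Nat) : Int) = (4 : Int) := by
            intro hx; exact h4 (by simpa using hx)
          omega
        rw [ih (acc ++ [c]) (by simpa using hlt)]
        constructor
        · rintro ⟨k, hk1, hk2, hk3, hmem⟩
          refine ⟨k + 1, by omega, by simpa using hk2,
            by simp only [List.length_append, List.length_cons, List.length_nil] at hk3 ⊢; omega, ?_⟩
          simpa [List.take_succ_cons, List.append_assoc] using hmem
        · rintro ⟨k, hk1, hk2, hk3, hmem⟩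
          rcases Nat.exists_eq_add_of_le hk1 with ⟨j, hj⟩
          subst hj
          rcases Nat.eq_zero_or_pos j with hj0 | hj0
          · subst hj0
            exfalso
            apply h
            rw [bInScope_eq]
            simpa using hmem
          · refine ⟨j, hj0, by simp only [List.length_cons] at hk2; omega,
              by simp only [List.length_append, List.length_cons, List.length_nil] at hk3 ⊢; omega, ?_⟩
            simpa [List.take_succ_cons, List.append_assoc, Nat.add_comm 1 j] using hmem

-- characterisation of A's startswith scan
theorem scan_iff (s : String) :
    inScopePrefixes.any (fun pfx => PySem.Str.startswith s pfx) = true ↔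
    ∃ k, 1 ≤ k ∧ k ≤ s.toList.length ∧ k ≤ 4 ∧
      String.ofList (s.toList.take k) ∈ inScopePrefixes := by
  rw [List.any_eq_true]
  constructor
  · rintro ⟨p, hp, hsw⟩
    have hpre : p.toList <+: s.toList := by
      rw [PySem.Str.startswith_eq, PySem.Chars.startswith_iff] at hsw
      exact hsw
    refine ⟨p.toList.length, inScope_nonempty p hp, hpre.length_le, inScope_len_le p hp, ?_⟩
    rw [← List.prefix_iff_eq_take.mp hpre, String.ofList_toList]
    exact hp
  · rintro ⟨k, hk1, hk2, hk4, hmem⟩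
    refine ⟨String.ofList (s.toList.take k), hmem, ?_⟩
    rw [PySem.Str.startswith_eq, PySem.Chars.startswith_iff, String.toList_ofList]
    exact List.take_prefix k s.toList

-- exact membership implies the walk succeeds
theorem contains_imp_walk (s : String) (h : inScopePrefixes.contains s = true) :
    anyPrefix s.toList [] = true := by
  rw [anyPrefix_iff _ _ (by simp)]
  have hmem : s ∈ inScopePrefixes := by simpa using h
  refine ⟨s.toList.length, inScope_nonempty s hmem, le_refl _,
    by simpa using inScope_len_le s hmem, ?_⟩
  simp only [List.take_length, List.nil_append, String.ofList_toList]
  exact hmem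

-- ===== VERDICT (by name: the statement is the Claim_ definition above) =====
theorem is_in_scope_spec : Claim_equal_is_in_scope := by
  intro qcode _
  unfold Spec_is_in_scope is_in_scope is_in_scope_alt
  by_cases h0 : qcode == ""
  · rw [if_pos h0, if_pos h0]
  · rw [if_neg h0, if_neg h0]
    rw [bOutOfScope_eq]
    by_cases hout : outOfScopePrefixes.contains (PySem.Str.upper qcode) = true
    · rw [if_pos hout, if_pos hout]
    · rw [if_neg hout, if_neg hout]
      by_cases hin : inScopePrefixes.contains (PySem.Str.upper qcode) = true
      · rw [if_pos hin, (contains_imp_walk _ hin)]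
      · rw [if_neg hin]
        rw [Bool.eq_iff_iff, scan_iff, anyPrefix_iff _ _ (by simp)]
        simp
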